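-- pv_equiv track=rewrite | github.com/Auel44/Point-of-Sale-POS-System-with-Python-Tkinter-and-SQLite | pos_system/utils/validators.py | generate_username_from_fullname
-- ===== SOURCE A (Python) =====
-- def generate_username_from_fullname(full_name: str, max_length: int = 7) -> str:
-- 	"""Generate a letters-only username by blending all name parts.
--
-- 	This uses a round-robin character pick across each word so multi-part
-- 	names contribute to the final username while still honoring max_length.
-- 	"""
-- 	if not full_name:
-- 		return ""
--
-- 	import unicodedata
--
-- 	name = unicodedata.normalize("NFKD", full_name)
-- 	name = name.encode("ASCII", "ignore").decode("ASCII")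
-- 	parts = [
-- 		"".join(ch for ch in token.lower() if ch.isalpha())
-- 		for token in name.split()
-- 	]
-- 	parts = [part for part in parts if part]
-- 	if not parts:
-- 		return ""
-- 	if max_length < 1:
-- 		max_length = 1
--
-- 	indices = [0] * len(parts)
-- 	username_chars: list[str] = []
-- 	while len(username_chars) < max_length:
-- 		added_in_cycle = False
-- 		for idx, part in enumerate(parts):
-- 			if len(username_chars) >= max_length:
-- 				break
-- 			if indices[idx] < len(part):
-- 				username_chars.append(part[indices[idx]])
-- 				indices[idx] += 1
-- 				added_in_cycle = True
-- 		if not added_in_cycle: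
-- 			break
--
-- 	return "".join(username_chars)
-- ===== SOURCE B (Python) =====
-- def generate_username_from_fullname(full_name: str, max_length: int = 7) -> str:
-- 	"""Generate a letters-only username by blending all name parts.
--
-- 	Decorate-sort-undecorate: tag every character with its (position-in-part,
-- 	part-index) key, sort all tagged characters by that key, and take the first
-- 	max_length characters.  Sorting by (position, part) reproduces the
-- 	column-major blend order exactly.
-- 	"""
-- 	if not full_name:
-- 		return ""
--
-- 	import unicodedata
--
-- 	name = unicodedata.normalize("NFKD", full_name)
-- 	name = name.encode("ASCII", "ignore").decode("ASCII")
-- 	parts = [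
-- 		"".join(ch for ch in token.lower() if ch.isalpha())
-- 		for token in name.split()
-- 	]
-- 	parts = [part for part in parts if part]
-- 	if not parts:
-- 		return ""
-- 	if max_length < 1:
-- 		max_length = 1
--
-- 	tagged = [
-- 		(j, i, ch)
-- 		for i, part in enumerate(parts)
-- 		for j, ch in enumerate(part)
-- 	]
-- 	tagged = sorted(tagged, key=lambda t: (t[0], t[1]))
-- 	return "".join(ch for _, _, ch in tagged[:max_length])
-- ===== Notes on version B (the rewrite author's own statement) =====
-- stated objective: alternative
-- what changed: Replaces A's stateful round-robin (per-part index array mutated in a while/for loop with an added_in_cycle flag) by decorate-sort-undecorate: tag every character with a (position-in-part, part-index) key, sort the tagged characters by that key, and take the first max_length characters.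
import Mathlib
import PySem

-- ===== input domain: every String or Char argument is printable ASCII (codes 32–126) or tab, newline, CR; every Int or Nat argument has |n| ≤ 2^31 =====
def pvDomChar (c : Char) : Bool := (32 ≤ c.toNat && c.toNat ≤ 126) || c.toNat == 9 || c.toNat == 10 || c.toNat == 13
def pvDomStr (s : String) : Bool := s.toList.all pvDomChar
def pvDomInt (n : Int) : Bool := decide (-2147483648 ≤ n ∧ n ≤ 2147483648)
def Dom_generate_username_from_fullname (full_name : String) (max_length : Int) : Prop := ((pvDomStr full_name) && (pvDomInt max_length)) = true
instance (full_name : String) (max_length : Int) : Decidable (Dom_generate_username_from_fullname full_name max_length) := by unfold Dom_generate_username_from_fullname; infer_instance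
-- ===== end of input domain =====

-- B replaces A's index-tracking round-robin while/for loop with decorate-sort-undecorate:
-- every character is tagged with its (position-in-part, part-index) key, the tagged list is
-- sorted by that key, and the first max_length characters are taken; objective: alternative.
-- NFKD normalization + ASCII encode/ignore in the Python preamble is the identity on the
-- printable-ASCII domain Dom_ restricts to, so both ports omit it (exact on that domain).


-- shared preamble helper (identical Python lines in A and B):
-- parts = [''.join(ch for ch in token.lower() if ch.isalpha()) for token in name.split()]; parts = [p for p in parts if p]
def pvParts (full_name : String) : List (List Char) :=
  ((PySem.Str.split₀ full_name).map
    (fun tok => (PySem.Chars.lower tok.toList).filter PySem.Chars.isalpha)).filter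
    (fun p => !p.isEmpty)

-- ===== PORT A =====
-- inner `for idx, part in enumerate(parts)` loop of one while-cycle; state = (indices, username_chars, added_in_cycle)
def pvCycle (maxLen : Nat) (enum : List (List Char × Nat)) (indices : List Nat)
    (chars : List Char) (added : Bool) : List Nat × List Char × Bool :=
  match enum with
  | [] => (indices, chars, added)
  | (part, idx) :: rest =>
    if maxLen ≤ chars.length then (indices, chars, added)
    else if indices.getD idx 0 < part.length then
      pvCycle maxLen rest (indices.set idx (indices.getD idx 0 + 1))
        (chars ++ [part.getD (indices.getD idx 0) ' ']) true
    else pvCycle maxLen rest indices chars added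

-- outer `while len(username_chars) < max_length` loop; fuel = max_length cycles suffice
-- (every continuing cycle appends at least one character)
def pvLoop (fuel maxLen : Nat) (parts : List (List Char)) (indices : List Nat)
    (chars : List Char) : List Char :=
  match fuel with
  | 0 => chars
  | fuel + 1 =>
    if chars.length < maxLen then
      match pvCycle maxLen parts.zipIdx indices chars false with
      | (indices', chars', added) =>
        if added then pvLoop fuel maxLen parts indices' chars' else chars'
    else chars

def generate_username_from_fullname (full_name : String) (max_length : Int) : String :=
  if full_name = "" then "" else
  let parts := pvParts full_name
  if parts = [] then "" else
  let maxLen : Nat := (if max_length < 1 then (1 : Int) else max_length).toNat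
  String.mk (pvLoop maxLen maxLen parts (List.replicate parts.length 0) [])

-- ===== PORT B =====
-- tagged = [(j, i, ch) for i, part in enumerate(parts) for j, ch in enumerate(part)]
def pvTag (parts : List (List Char)) : List (Nat × Nat × Char) :=
  parts.zipIdx.flatMap (fun pi => pi.1.zipIdx.map (fun cj => (cj.2, pi.2, cj.1)))

def generate_username_from_fullname_alt (full_name : String) (max_length : Int) : String :=
  if full_name = "" then "" else
  let parts := pvParts full_name
  if parts = [] then "" else
  let maxLen : Nat := (if max_length < 1 then (1 : Int) else max_length).toNat
  -- tagged = sorted(tagged, key=lambda t: (t[0], t[1]))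
  let keyed := PySem.List.sorted2 (pvTag parts) (fun t => t.1) (fun t => t.2.1)
  -- ''.join(ch for _, _, ch in tagged[:max_length])
  String.mk ((keyed.take maxLen).map (fun t => t.2.2))

-- ===== PRECONDITION & SPEC =====
def Spec_generate_username_from_fullname (full_name : String) (max_length : Int) (out : String) : Prop := out = generate_username_from_fullname_alt full_name max_length
instance (full_name : String) (max_length : Int) (out : String) : Decidable (Spec_generate_username_from_fullname full_name max_length out) := by unfold Spec_generate_username_from_fullname; infer_instance

-- ===== CLAIM (what is proved, stated in full; the proofs are below) =====
def Claim_equal_generate_username_from_fullname : Prop := ∀ (full_name : String) (max_length : Int), Dom_generate_username_from_fullname full_name max_length → Spec_generate_username_from_fullname full_name max_length (generate_username_from_fullname full_name max_length)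

-- ===== LEMMAS AND PROOFS =====

-- column j of the transpose
def pvCol (parts : List (List Char)) (j : Nat) : List Char :=
  parts.filterMap (fun p => p[j]?)

-- the fold computing the longest part length
def pvM (parts : List (List Char)) : Nat := parts.foldl (fun m p => Nat.max m p.length) 0

lemma pvM_ge (parts : List (List Char)) : ∀ acc, acc ≤ parts.foldl (fun m p => Nat.max m p.length) acc ∧
    ∀ p ∈ parts, p.length ≤ parts.foldl (fun m p => Nat.max m p.length) acc := by
  induction parts with
  | nil => intro acc; simp
  | cons q rest ih =>
    intro acc
    refine ⟨le_trans (Nat.le_max_left _ _) (ih (Nat.max acc q.length)).1, ?_⟩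
    intro p hp
    rcases List.mem_cons.mp hp with h | h
    · subst h; exact le_trans (Nat.le_max_right _ _) (ih (Nat.max acc p.length)).1
    · exact (ih (Nat.max acc q.length)).2 p h

lemma pvM_exists (parts : List (List Char)) : ∀ acc j, j < parts.foldl (fun m p => Nat.max m p.length) acc →
    j < acc ∨ ∃ p ∈ parts, j < p.length := by
  induction parts with
  | nil => intro acc j h; exact Or.inl h
  | cons q rest ih =>
    intro acc j h
    rcases ih (Nat.max acc q.length) j h with h' | ⟨p, hp, hj⟩
    · rcases lt_max_iff.mp h' with h'' | h''
      · exact Or.inl h''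
      · exact Or.inr ⟨q, by simp, h''⟩
    · exact Or.inr ⟨p, by simp [hp], hj⟩

lemma pvCol_ne_nil (parts : List (List Char)) (j : Nat) (h : j < pvM parts) :
    pvCol parts j ≠ [] := by
  rcases pvM_exists parts 0 j h with h' | ⟨p, hp, hj⟩
  · omega
  · intro hc
    have : (p[j]?).isSome := by simp; omega
    have hmem : ∀ q ∈ parts, q[j]? = none := by
      intro q hq
      by_contra hne
      rcases Option.ne_none_iff_exists'.mp hne with ⟨c, hc'⟩
      have : c ∈ pvCol parts j := List.mem_filterMap.mpr ⟨q, hq, hc'⟩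
      simp [hc] at this
    rw [hmem p hp] at this; simp at this

lemma pvCol_nil (parts : List (List Char)) (j : Nat) (h : pvM parts ≤ j) :
    pvCol parts j = [] := by
  apply List.filterMap_eq_nil_iff.mpr
  intro p hp
  have := (pvM_ge parts 0).2 p hp
  simp; unfold pvM at h; omega

lemma pv_getD_drop {α : Type} (l : List α) (k i : Nat) (d : α) (h : k ≤ i) :
    (l.drop k).getD (i - k) d = l.getD i d := by
  simp only [List.getD_eq_getElem?_getD, List.getElem?_drop]
  congr 2
  omega

lemma pv_eq_of_getD {α : Type} (a b : List α) (d : α) (h : a.length = b.length)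
    (h2 : ∀ i, i < a.length → a.getD i d = b.getD i d) : a = b := by
  apply List.ext_getElem h
  intro i h1 h1'
  have := h2 i h1
  simpa [List.getD_eq_getElem?_getD, List.getElem?_eq_getElem, h1, h1'] using this

lemma pvCycle_spec (maxLen j : Nat) (parts : List (List Char)) :
    ∀ rest k indices chars added, rest = parts.drop k → indices.length = parts.length →
    (∀ i, k ≤ i → i < parts.length → indices.getD i 0 = Nat.min j (parts.getD i []).length) →
    ∃ indices',
      pvCycle maxLen (rest.zipIdx k) indices chars added =
        (indices', chars ++ (pvCol rest j).take (maxLen - chars.length),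
          added || (decide (chars.length < maxLen) && decide (pvCol rest j ≠ []))) ∧
      (chars.length + (pvCol rest j).length ≤ maxLen →
        indices'.length = parts.length ∧
        ∀ i, i < parts.length →
          indices'.getD i 0 = if k ≤ i then Nat.min (j + 1) (parts.getD i []).length
                              else indices.getD i 0) := by
  intro rest
  induction rest with
  | nil =>
    intro k indices chars added hrest hlen hk
    refine ⟨indices, by simp [pvCycle, pvCol], ?_⟩
    intro _
    have hk' : parts.length ≤ k := List.drop_eq_nil_iff.mp hrest.symm
    exact ⟨hlen, fun i hi => by rw [if_neg (by omega)]⟩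
  | cons p rest' ih =>
    intro k indices chars added hrest hlen hk
    have hk0 : k < parts.length := by
      by_contra hcon
      have : parts.drop k = [] := List.drop_eq_nil_iff.mpr (by omega)
      rw [this] at hrest
      exact (List.cons_ne_nil _ _) hrest
    have hpk : parts.getD k [] = p := by
      have h1 := pv_getD_drop parts k k [] le_rfl
      rw [← hrest] at h1
      simpa using h1.symm
    have hrest' : rest' = parts.drop (k + 1) := by
      have : (p :: rest').tail = (parts.drop k).tail := by rw [hrest]
      simpa [List.tail_drop] using this
    have hIk : indices.getD k 0 = Nat.min j p.length := by rw [hk k le_rfl hk0, hpk]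
    rw [List.zipIdx_cons]
    by_cases hfull : maxLen ≤ chars.length
    · refine ⟨indices, ?_, ?_⟩
      · rw [pvCycle, if_pos hfull]
        have hd : decide (chars.length < maxLen) = false := decide_eq_false (by omega)
        simp only [Nat.sub_eq_zero_of_le hfull, List.take_zero, List.append_nil, hd,
          Bool.false_and, Bool.or_false]
      · intro htr
        have hcol0 : pvCol (p :: rest') j = [] :=
          List.eq_nil_of_length_eq_zero (by omega)
        have hnone := List.filterMap_eq_nil_iff.mp hcol0
        refine ⟨hlen, ?_⟩
        intro i hi
        by_cases hki : k ≤ i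
        · rw [if_pos hki, hk i hki hi]
          have hmem : parts.getD i [] ∈ p :: rest' := by
            rw [hrest, ← pv_getD_drop parts k i [] hki]
            have hlt : i - k < (parts.drop k).length := by
              rw [List.length_drop]; omega
            simp only [List.getD_eq_getElem?_getD, List.getElem?_eq_getElem hlt,
              Option.getD_some]
            exact List.getElem_mem _
          have hlej : (parts.getD i []).length ≤ j :=
            List.getElem?_eq_none_iff.mp (hnone _ hmem)
          simp only [Nat.min_def]
          split_ifs <;> omega
        · rw [if_neg hki]
    · by_cases hj : j < p.length
      · have hmin : Nat.min j p.length = j := Nat.min_eq_left (le_of_lt hj)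
        have hgj : p[j]? = some (p.getD j ' ') := by
          simp [List.getD_eq_getElem?_getD, List.getElem?_eq_getElem hj]
        have hcol : pvCol (p :: rest') j = p.getD j ' ' :: pvCol rest' j := by
          unfold pvCol
          simp only [List.filterMap_cons, hgj]
        have hset : ∀ i, k + 1 ≤ i → i < parts.length →
            (indices.set k (indices.getD k 0 + 1)).getD i 0 =
              Nat.min j (parts.getD i []).length := by
          intro i hi1 hi2
          rw [List.getD_eq_getElem?_getD, List.getElem?_set, if_neg (by omega),
            ← List.getD_eq_getElem?_getD]
          exact hk i (by omega) hi2
        obtain ⟨I', hres, htr⟩ := ih (k + 1) (indices.set k (indices.getD k 0 + 1))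
          (chars ++ [p.getD (indices.getD k 0) ' ']) true hrest' (by simpa using hlen) hset
        refine ⟨I', ?_, ?_⟩
        · have hguard : indices.getD k 0 < p.length := by rw [hIk]; omega
          rw [pvCycle, if_neg (by omega), if_pos hguard, hres]
          simp only [Prod.mk.injEq]
          refine ⟨trivial, ?_, ?_⟩
          · rw [hIk, hmin, hcol]
            have hml : maxLen - chars.length = (maxLen - (chars.length + 1)) + 1 := by
              omega
            simp only [List.length_append, List.length_cons, List.length_nil]
            rw [hml, List.take_succ_cons]
            simp
          · simp [hcol, Nat.not_le.mp hfull]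
        · intro htrunc
          rw [hcol] at htrunc
          obtain ⟨hlen', hpt⟩ := htr (by
            simp only [List.length_append, List.length_cons, List.length_nil] at htrunc ⊢
            omega)
          refine ⟨hlen', ?_⟩
          intro i hi
          rw [hpt i hi]
          by_cases h1 : k + 1 ≤ i
          · rw [if_pos h1, if_pos (by omega)]
          · by_cases h2 : k ≤ i
            · have hik : i = k := by omega
              subst hik
              rw [if_neg h1, if_pos h2, List.getD_eq_getElem?_getD, List.getElem?_set,
                if_pos rfl, if_pos (by omega), Option.getD_some, hIk, hmin, hpk]
              simp only [Nat.min_def]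
              split_ifs <;> omega
            · rw [if_neg h1, if_neg h2, List.getD_eq_getElem?_getD, List.getElem?_set,
                if_neg (by omega), ← List.getD_eq_getElem?_getD]
      · have hmin : Nat.min j p.length = p.length := Nat.min_eq_right (by omega)
        have hgj : p[j]? = none := List.getElem?_eq_none_iff.mpr (by omega)
        have hcol : pvCol (p :: rest') j = pvCol rest' j := by
          unfold pvCol
          simp only [List.filterMap_cons, hgj]
        obtain ⟨I', hres, htr⟩ := ih (k + 1) indices chars added hrest' hlen
          (fun i hi1 hi2 => hk i (by omega) hi2)
        refine ⟨I', ?_, ?_⟩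
        · have hguard : ¬ indices.getD k 0 < p.length := by rw [hIk, hmin]; omega
          rw [pvCycle, if_neg (by omega), if_neg hguard, hres, hcol]
        · intro htrunc
          rw [hcol] at htrunc
          obtain ⟨hlen', hpt⟩ := htr htrunc
          refine ⟨hlen', ?_⟩
          intro i hi
          rw [hpt i hi]
          by_cases h1 : k + 1 ≤ i
          · rw [if_pos h1, if_pos (by omega)]
          · by_cases h2 : k ≤ i
            · have hik : i = k := by omega
              subst hik
              rw [if_neg h1, if_pos h2, hIk, hpk]
              simp only [Nat.min_def]
              split_ifs <;> omega
            · rw [if_neg h1, if_neg h2]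

lemma pvLoop_full (fuel maxLen : Nat) (parts : List (List Char)) (indices : List Nat)
    (chars : List Char) (h : maxLen ≤ chars.length) :
    pvLoop fuel maxLen parts indices chars = chars := by
  cases fuel <;> simp [pvLoop, Nat.not_lt.mpr h]

lemma pv_map_min_getD (parts : List (List Char)) (j : Nat) :
    ∀ i, i < parts.length →
      (parts.map (fun p => Nat.min j p.length)).getD i 0 =
        Nat.min j (parts.getD i []).length := by
  intro i hi
  rw [List.getD_eq_getElem?_getD, List.getElem?_map, List.getElem?_eq_getElem hi]
  simp [List.getD_eq_getElem?_getD, List.getElem?_eq_getElem hi]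

-- the while loop at uniform column j computes the truncated transpose from column j on
lemma pvLoop_spec (maxLen : Nat) (parts : List (List Char)) :
    ∀ fuel j chars, chars.length ≤ maxLen → maxLen - chars.length ≤ fuel →
    pvLoop fuel maxLen parts (parts.map (fun p => Nat.min j p.length)) chars =
      (chars ++ (List.range' j (pvM parts - j)).flatMap (pvCol parts)).take maxLen := by
  intro fuel
  induction fuel with
  | zero =>
    intro j chars h1 h2
    have hz : maxLen - chars.length = 0 := by omega
    rw [pvLoop, List.take_append, List.take_of_length_le h1, hz, List.take_zero,
      List.append_nil]
  | succ fuel ih =>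
    intro j chars h1 h2
    have hflat : j < pvM parts →
        (List.range' j (pvM parts - j)).flatMap (pvCol parts) =
          pvCol parts j ++ (List.range' (j + 1) (pvM parts - (j + 1))).flatMap (pvCol parts) := by
      intro hM
      have hstep : pvM parts - j = (pvM parts - (j + 1)) + 1 := by omega
      rw [hstep, List.range'_succ, List.flatMap_cons]
    rw [pvLoop]
    by_cases hlt : chars.length < maxLen
    · rw [if_pos hlt]
      obtain ⟨I', hres, htr⟩ := pvCycle_spec maxLen j parts parts 0
        (parts.map (fun p => Nat.min j p.length)) chars false rfl (by simp)
        (fun i _ hi => pv_map_min_getD parts j i hi)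
      rw [hres]
      by_cases hM : j < pvM parts
      · have hcne : pvCol parts j ≠ [] := pvCol_ne_nil parts j hM
        have hcpos : 0 < (pvCol parts j).length := List.length_pos_iff.mpr hcne
        simp only [hlt, hcne, decide_true, ne_eq, not_false_eq_true, Bool.and_self,
          Bool.false_or, if_true]
        by_cases htru : chars.length + (pvCol parts j).length ≤ maxLen
        · obtain ⟨hlen', hpt⟩ := htr htru
          have hIeq : I' = parts.map (fun p => Nat.min (j + 1) p.length) := by
            apply pv_eq_of_getD _ _ 0 (by simp [hlen'])
            intro i hi
            rw [hlen'] at hi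
            rw [hpt i hi, if_pos (Nat.zero_le i), pv_map_min_getD parts (j + 1) i hi]
          have htk : List.take (maxLen - chars.length) (pvCol parts j) = pvCol parts j :=
            List.take_of_length_le (by omega)
          have harg1 : (chars ++ pvCol parts j).length ≤ maxLen := by
            simp only [List.length_append]; omega
          have harg2 : maxLen - (chars ++ pvCol parts j).length ≤ fuel := by
            simp only [List.length_append]; omega
          rw [htk, hIeq, ih (j + 1) (chars ++ pvCol parts j) harg1 harg2,
            hflat hM, List.append_assoc]
        · have hfull2 : maxLen ≤ (chars ++ List.take (maxLen - chars.length) (pvCol parts j)).length := by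
            simp only [List.length_append, List.length_take]; omega
          rw [pvLoop_full fuel maxLen parts I' _ hfull2, hflat hM, List.take_append,
            List.take_of_length_le hlt.le, List.take_append]
          have hz : maxLen - chars.length - (pvCol parts j).length = 0 := by omega
          rw [hz, List.take_zero, List.append_nil]
      · have hc0 : pvCol parts j = [] := pvCol_nil parts j (by omega)
        have hM0 : pvM parts - j = 0 := by omega
        simp [hc0, hM0, List.take_of_length_le h1]
    · rw [if_neg hlt]
      have hz : maxLen - chars.length = 0 := by omega
      rw [List.take_append, List.take_of_length_le h1, hz, List.take_zero,
        List.append_nil]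

lemma pvLoop_main (maxLen : Nat) (parts : List (List Char)) :
    pvLoop maxLen maxLen parts (List.replicate parts.length 0) [] =
      ((List.range (pvM parts)).flatMap (pvCol parts)).take maxLen := by
  have h0 : List.replicate parts.length 0 = parts.map (fun p => Nat.min 0 p.length) := by
    simp [List.map_const']
  rw [h0, pvLoop_spec maxLen parts maxLen 0 [] (by simp) (by simp)]
  simp [List.range_eq_range']

-- ============ B side: the sorted tagged list IS the column-major transpose ============

-- the sort key (t[0], t[1]) as a lexicographic pair
def pvKey (t : Nat × Nat × Char) : ℕ ×ₗ ℕ := toLex (t.1, t.2.1)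

-- column j of the transpose, still tagged
def pvColT (parts : List (List Char)) (j : Nat) : List (Nat × Nat × Char) :=
  parts.zipIdx.filterMap (fun pi => (pi.1[j]?).map (fun ch => (j, pi.2, ch)))

-- the tagged transpose, column-major
def pvTT (parts : List (List Char)) : List (Nat × Nat × Char) :=
  (List.range (pvM parts)).flatMap (pvColT parts)

-- Python's tuple key (t[0], t[1]) is the lexicographic order on ℕ ×ₗ ℕ
lemma pv_sorted2_eq (xs : List (Nat × Nat × Char)) :
    PySem.List.sorted2 xs (fun t => t.1) (fun t => t.2.1) =
      PySem.List.sorted xs pvKey := by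
  rw [PySem.List.sorted_eq_foldl_insertBy]
  have hbe : (fun (a b : Nat × Nat × Char) =>
      decide (a.1 < b.1) || (!decide (b.1 < a.1) && decide (a.2.1 < b.2.1))) =
      fun a b => decide (pvKey a < pvKey b) := by
    funext a b
    have : (pvKey a < pvKey b) ↔ (a.1 < b.1 ∨ a.1 = b.1 ∧ a.2.1 < b.2.1) := by
      simp [pvKey, Prod.Lex.toLex_lt_toLex]
    rcases Nat.lt_trichotomy a.1 b.1 with h | h | h <;>
      by_cases h2 : a.2.1 < b.2.1 <;>
      simp [this, h, h2] <;> omega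
  simp [PySem.List.sorted2, hbe]

lemma pv_zipIdx_pairwise {α : Type} (l : List α) :
    ∀ k, (l.zipIdx k).Pairwise (fun a b => a.2 < b.2) := by
  induction l with
  | nil => intro k; simp
  | cons x t ih =>
    intro k
    rw [List.zipIdx_cons]
    refine List.Pairwise.cons ?_ (ih (k + 1))
    intro b hb
    have := (List.mem_zipIdx hb).1
    simpa using this

lemma pv_mem_colT (parts : List (List Char)) (j : Nat) (t : Nat × Nat × Char) :
    t ∈ pvColT parts j ↔ t.1 = j ∧ parts[t.2.1]?.bind (fun p => p[j]?) = some t.2.2 := by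
  unfold pvColT
  rw [List.mem_filterMap]
  constructor
  · rintro ⟨pi, hpi, hf⟩
    rcases Option.map_eq_some_iff.mp hf with ⟨ch, hch, ht⟩
    have hget : parts[pi.2]? = some pi.1 := List.mk_mem_zipIdx_iff_getElem?.mp (by
      cases pi; simpa using hpi)
    subst ht
    simp [hget, hch]
  · rintro ⟨h1, h2⟩
    rcases Option.bind_eq_some_iff.mp h2 with ⟨p, hp, hch⟩
    refine ⟨(p, t.2.1), ?_, ?_⟩
    · exact List.mk_mem_zipIdx_iff_getElem?.mpr hp
    · obtain ⟨j', i', ch'⟩ := t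
      simp only at h1
      subst h1
      simp [hch]

lemma pv_mem_tag (parts : List (List Char)) (t : Nat × Nat × Char) :
    t ∈ pvTag parts ↔ parts[t.2.1]?.bind (fun p => p[t.1]?) = some t.2.2 := by
  unfold pvTag
  rw [List.mem_flatMap]
  constructor
  · rintro ⟨pi, hpi, hmem⟩
    rcases List.mem_map.mp hmem with ⟨cj, hcj, ht⟩
    have hget : parts[pi.2]? = some pi.1 := List.mk_mem_zipIdx_iff_getElem?.mp (by
      cases pi; simpa using hpi)
    have hch : pi.1[cj.2]? = some cj.1 := List.mk_mem_zipIdx_iff_getElem?.mp (by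
      cases cj; simpa using hcj)
    subst ht
    simp [hget, hch]
  · rintro h
    rcases Option.bind_eq_some_iff.mp h with ⟨p, hp, hch⟩
    refine ⟨(p, t.2.1), List.mk_mem_zipIdx_iff_getElem?.mpr hp, ?_⟩
    rw [List.mem_map]
    refine ⟨(t.2.2, t.1), List.mk_mem_zipIdx_iff_getElem?.mpr hch, ?_⟩
    obtain ⟨j', i', ch'⟩ := t
    rfl

lemma pv_mem_TT (parts : List (List Char)) (t : Nat × Nat × Char) :
    t ∈ pvTT parts ↔ parts[t.2.1]?.bind (fun p => p[t.1]?) = some t.2.2 := by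
  unfold pvTT
  rw [List.mem_flatMap]
  constructor
  · rintro ⟨j, _, hmem⟩
    rcases (pv_mem_colT parts j t).mp hmem with ⟨h1, h2⟩
    rw [h1]; exact h2
  · intro h
    refine ⟨t.1, ?_, (pv_mem_colT parts t.1 t).mpr ⟨rfl, h⟩⟩
    rcases Option.bind_eq_some_iff.mp h with ⟨p, hp, hch⟩
    have hpmem : p ∈ parts := List.mem_of_getElem? hp
    have h1 : t.1 < p.length := List.getElem?_eq_some_iff.mp hch |>.1
    have h2 : p.length ≤ pvM parts := (pvM_ge parts 0).2 p hpmem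
    exact List.mem_range.mpr (by omega)

lemma pv_TT_pairwise (parts : List (List Char)) :
    (pvTT parts).Pairwise (fun a b => pvKey a < pvKey b) := by
  unfold pvTT
  rw [List.pairwise_flatMap]
  constructor
  · intro j _
    have hpw : (parts.zipIdx.filterMap
        (fun pi => (pi.1[j]?).map (fun ch => (j, pi.2, ch)))).Pairwise
        (fun a b => a.2.1 < b.2.1) := by
      apply List.Pairwise.filterMap _ ?_ (pv_zipIdx_pairwise parts 0)
      intro a a' hlt b hb b' hb'
      rcases Option.map_eq_some_iff.mp hb with ⟨ch, _, hb2⟩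
      rcases Option.map_eq_some_iff.mp hb' with ⟨ch', _, hb2'⟩
      subst hb2; subst hb2'
      exact hlt

    refine hpw.imp_of_mem ?_
    intro a b ha hb hlt
    have ha1 := ((pv_mem_colT parts j a).mp (by exact ha)).1
    have hb1 := ((pv_mem_colT parts j b).mp (by exact hb)).1
    simp [pvKey, Prod.Lex.toLex_lt_toLex, ha1, hb1]
    omega
  · refine (List.pairwise_lt_range).imp_of_mem ?_
    intro j1 j2 _ _ hlt x hx y hy
    have hx1 := ((pv_mem_colT parts j1 x).mp hx).1
    have hy1 := ((pv_mem_colT parts j2 y).mp hy).1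
    simp [pvKey, Prod.Lex.toLex_lt_toLex, hx1, hy1]
    omega

lemma pv_tag_pairwise (parts : List (List Char)) :
    (pvTag parts).Pairwise (fun a b => pvKey a ≠ pvKey b) := by
  unfold pvTag
  rw [List.pairwise_flatMap]
  constructor
  · intro pi _
    have hpw : (pi.1.zipIdx.map (fun cj => (cj.2, pi.2, cj.1))).Pairwise
        (fun a b => a.1 < b.1) := by
      rw [List.pairwise_map]
      exact pv_zipIdx_pairwise pi.1 0
    refine hpw.imp ?_
    intro a b hlt
    simp [pvKey]
    omega
  · refine (pv_zipIdx_pairwise parts 0).imp_of_mem ?_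
    intro pi pi' _ _ hlt x hx y hy
    rcases List.mem_map.mp hx with ⟨cj, _, hx2⟩
    rcases List.mem_map.mp hy with ⟨cj', _, hy2⟩
    subst hx2; subst hy2
    simp [pvKey]
    omega

lemma pv_sorted_tag (parts : List (List Char)) :
    PySem.List.sorted (pvTag parts) pvKey = pvTT parts := by
  apply PySem.List.sorted_eq_of_perm_of_pairwise_lt
  · refine (List.perm_ext_iff_of_nodup ?_ ?_).mpr ?_
    · exact (pv_TT_pairwise parts).imp (fun h => by
        intro he; subst he; exact lt_irrefl _ h)
    · exact (pv_tag_pairwise parts).imp (fun h => by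
        intro he; subst he; exact h rfl)
    · intro t
      rw [pv_mem_TT, pv_mem_tag]
  · exact pv_TT_pairwise parts

lemma pv_filterMap_zipIdx {α β : Type} (l : List α) (f : α → Option β) :
    ∀ k, (l.zipIdx k).filterMap (fun pi => f pi.1) = l.filterMap f := by
  induction l with
  | nil => intro k; simp
  | cons x t ih =>
    intro k
    rw [List.zipIdx_cons]
    simp only [List.filterMap_cons]
    cases f x <;> simp [ih (k + 1)]

lemma pv_colT_map (parts : List (List Char)) (j : Nat) :
    (pvColT parts j).map (fun t => t.2.2) = pvCol parts j := by
  unfold pvColT pvCol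
  rw [List.map_filterMap]
  have : (fun (pi : List Char × Nat) =>
      ((pi.1[j]?).map (fun ch => ((j, pi.2, ch) : Nat × Nat × Char))).map
        (fun t => t.2.2)) = fun pi => pi.1[j]? := by
    funext pi
    cases pi.1[j]? <;> rfl
  rw [this]
  exact pv_filterMap_zipIdx parts (fun p => p[j]?) 0

-- ===== VERDICT (by name: the statement is the Claim_ definition above) =====
theorem generate_username_from_fullname_spec : Claim_equal_generate_username_from_fullname := by
  intro full_name max_length _
  unfold Spec_generate_username_from_fullname
  unfold generate_username_from_fullname generate_username_from_fullname_alt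
  by_cases h1 : full_name = "" <;> simp [h1]
  by_cases h2 : pvParts full_name = [] <;> simp [h2]
  rw [pvLoop_main _ (pvParts full_name), pv_sorted2_eq, pv_sorted_tag]
  have hm : (pvTT (pvParts full_name)).map (fun t => t.2.2) =
      (List.range (pvM (pvParts full_name))).flatMap (pvCol (pvParts full_name)) := by
    unfold pvTT
    rw [List.map_flatMap]
    congr 1
    funext j
    exact pv_colT_map (pvParts full_name) j
  rw [hm]
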